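-- pv_equiv track=rewrite | github.com/c1oud99/Algorithm_Baekjoon | 31925.py | select_participants
-- ===== SOURCE A (Python) =====
-- def select_participants(participants):
--     filtered_participants = []
--
--     for participant in participants:
--         name, status, icpc, shake_rank, apc_rank = participant
--
--         # 재학 중
--         if status != "jaehak":
--             continue
--
--         # ICPC 수상자X
--         if icpc == "winner":
--             continue
--
--         # shake! 3위 이내X
--         if 1 <= shake_rank <= 3:
--             continue
--
--         filtered_participants.append(participant)
--
--     filtered_participants.sort(key=lambda x: x[4])
--     selected_participants = filtered_participants[:10]
--     selected_participants_names = sorted([participant[0] for participant in selected_participants])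
--
--     return selected_participants_names
-- ===== SOURCE B (Python) =====
-- def select_participants(participants):
--     # Single pass keeping only the 10 best (lowest apc_rank, stable) seen so far,
--     # instead of sorting the whole filtered list and slicing.
--     top = []  # always sorted by apc_rank, stable, length <= 10
--     for participant in participants:
--         name, status, icpc, shake_rank, apc_rank = participant
--         if status == "jaehak" and icpc != "winner" and not (1 <= shake_rank <= 3):
--             i = 0
--             while i < len(top) and top[i][4] <= apc_rank:
--                 i += 1
--             top.insert(i, participant)
--             if len(top) > 10:
--                 top.pop()
--     return sorted(p[0] for p in top)
-- ===== Notes on version B (the rewrite author's own statement) =====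
-- stated objective: alternative
-- what changed: B replaces sort-whole-filtered-list-then-slice by a single pass that maintains a stable bounded (size-10) sorted buffer, inserting each qualifying participant and discarding the overflow element immediately.
import Mathlib
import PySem

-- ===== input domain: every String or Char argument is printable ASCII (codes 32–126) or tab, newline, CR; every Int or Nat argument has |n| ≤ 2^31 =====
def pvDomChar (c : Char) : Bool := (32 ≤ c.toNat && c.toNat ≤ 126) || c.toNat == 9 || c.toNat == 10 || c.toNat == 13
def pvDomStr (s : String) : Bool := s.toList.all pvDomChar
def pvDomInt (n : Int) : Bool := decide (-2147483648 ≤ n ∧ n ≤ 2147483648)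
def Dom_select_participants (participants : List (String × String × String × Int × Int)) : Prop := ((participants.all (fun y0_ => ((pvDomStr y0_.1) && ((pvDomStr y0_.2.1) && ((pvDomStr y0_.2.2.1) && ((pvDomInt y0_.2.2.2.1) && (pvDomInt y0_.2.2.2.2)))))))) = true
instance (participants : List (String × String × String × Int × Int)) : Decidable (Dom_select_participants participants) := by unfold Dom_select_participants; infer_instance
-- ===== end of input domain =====

-- B keeps a bounded (≤ 10) stable-sorted buffer in one pass instead of sorting the whole
-- filtered list and slicing; same return value, different selection strategy.

-- ===== PORT A =====
-- loop body of A's filtering for-loop (the three 'continue' guards, then append)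
def aFilterStep (acc : List (String × String × String × Int × Int))
    (participant : String × String × String × Int × Int) :
    List (String × String × String × Int × Int) :=
  if participant.2.1 ≠ "jaehak" then acc
  else if participant.2.2.1 = "winner" then acc
  else if 1 ≤ participant.2.2.2.1 ∧ participant.2.2.2.1 ≤ 3 then acc
  else acc ++ [participant]

def select_participants (participants : List (String × String × String × Int × Int)) : List String :=
  let filtered := participants.foldl aFilterStep []
  let sortedF := PySem.List.sorted filtered (fun x => x.2.2.2.2)
  let selected := PySem.List.slice sortedF none (some 10)
  PySem.List.sorted (selected.map (fun participant => participant.1)) (fun x => x)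

-- ===== PORT B =====
-- loop body of B's for-loop; B's hand-written while/insert pair is exactly the stable
-- insert before the first strictly-greater key, i.e. PySem.List.insertBy, and
-- 'if len(top) > 10: top.pop()' is the dropLast behind the same length test
def bStep (top : List (String × String × String × Int × Int))
    (participant : String × String × String × Int × Int) :
    List (String × String × String × Int × Int) :=
  if participant.2.1 = "jaehak" ∧ participant.2.2.1 ≠ "winner" ∧
      ¬(1 ≤ participant.2.2.2.1 ∧ participant.2.2.2.1 ≤ 3) then
    let t := PySem.List.insertBy (fun a b => decide (a.2.2.2.2 < b.2.2.2.2)) participant top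
    if 10 < t.length then t.dropLast else t
  else top

def select_participants_alt (participants : List (String × String × String × Int × Int)) : List String :=
  let top := participants.foldl bStep []
  PySem.List.sorted (top.map (fun p => p.1)) (fun x => x)

-- ===== PRECONDITION & SPEC =====
def Spec_select_participants (participants : List (String × String × String × Int × Int)) (out : List String) : Prop := out = select_participants_alt participants
instance (participants : List (String × String × String × Int × Int)) (out : List String) : Decidable (Spec_select_participants participants out) := by unfold Spec_select_participants; infer_instance

-- ===== CLAIM (what is proved, stated in full; the proofs are below) =====
def Claim_equal_select_participants : Prop := ∀ (participants : List (String × String × String × Int × Int)), Dom_select_participants participants → Spec_select_participants participants (select_participants participants)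

-- ===== LEMMAS AND PROOFS =====

-- taking n of a stable insert into a prefix of length n is taking n of the full insert
theorem take_insertBy {α : Type} (b : α → α → Bool) (x : α) (l : List α) (n : Nat) :
    (PySem.List.insertBy b x (l.take n)).take n = (PySem.List.insertBy b x l).take n := by
  induction l generalizing n with
  | nil => simp
  | cons y ys ih =>
    cases n with
    | zero => simp
    | succ m =>
      simp only [List.take_succ_cons, PySem.List.insertBy]
      split
      · cases m with
        | zero => simp
        | succ k => simp [List.take_take]
      · simp [ih m]

theorem length_insertBy {α : Type} (b : α → α → Bool) (x : α) (l : List α) :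
    (PySem.List.insertBy b x l).length = l.length + 1 := by
  induction l with
  | nil => simp [PySem.List.insertBy]
  | cons y ys ih =>
    simp only [PySem.List.insertBy]
    split <;> simp [ih]

theorem cap_eq_take {α : Type} (t : List α) (h : t.length ≤ 11) :
    (if 10 < t.length then t.dropLast else t) = t.take 10 := by
  split
  · rw [List.dropLast_eq_take]
    congr 1
    omega
  · rw [List.take_of_length_le]
    omega

-- B's loop state after any prefix is the 10-smallest (stably) of A's filtered prefix
theorem loop_inv (ps fs : List (String × String × String × Int × Int)) :
    ps.foldl bStep ((PySem.List.sorted fs (fun x => x.2.2.2.2)).take 10)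
      = (PySem.List.sorted (ps.foldl aFilterStep fs) (fun x => x.2.2.2.2)).take 10 := by
  induction ps generalizing fs with
  | nil => rfl
  | cons p ps ih =>
    simp only [List.foldl_cons]
    have hstep : bStep ((PySem.List.sorted fs (fun x => x.2.2.2.2)).take 10) p
        = (PySem.List.sorted (aFilterStep fs p) (fun x => x.2.2.2.2)).take 10 := by
      unfold bStep aFilterStep
      by_cases h1 : p.2.1 = "jaehak"
      · by_cases h2 : p.2.2.1 = "winner"
        · simp [h1, h2]
        · by_cases h3 : 1 ≤ p.2.2.2.1 ∧ p.2.2.2.1 ≤ 3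
          · simp [h1, h2, h3]
          · simp only [h1, h2, h3, not_false_iff,  and_true, if_true,
              ne_eq, not_true_eq_false, if_false]
            rw [cap_eq_take _ (by
              rw [length_insertBy]
              have := List.length_take_le 10 (PySem.List.sorted fs (fun x => x.2.2.2.2))
              omega)]
            rw [take_insertBy]
            congr 1
            rw [PySem.List.sorted_eq_foldl_insertBy, PySem.List.sorted_eq_foldl_insertBy,
              List.foldl_append]
            rfl
      · simp [h1]
    rw [hstep, ih]

theorem select_participants_spec : Claim_equal_select_participants := by
  intro participants _
  unfold Spec_select_participants select_participants select_participants_alt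
  dsimp only
  rw [PySem.List.slice_to _ (b := 10) (by norm_num)]
  rw [show ((10:Int).toNat) = 10 from rfl]
  rw [← loop_inv participants []]
  rfl
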